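-- pv_equiv track=rewrite | github.com/FabianFrankel/AdventOfCode2020 | Fabian/6/puzzle6.py | get_exclusive_yes_answer_set
-- ===== SOURCE A (Python) =====
-- def get_exclusive_yes_answer_set(group_answer_array):
--     answer_arr = []
--     next_answers = []
--     first = True
--     for i in group_answer_array:
--         for j in i:
--             if first:
--                 answer_arr.append(j)
--             elif j in answer_arr:
--                 next_answers.append(j)
--         if not first:
--             answer_arr = next_answers
--             next_answers = []
--         first = False
--     return answer_arr
-- ===== SOURCE B (Python) =====
-- def get_exclusive_yes_answer_set(group_answer_array):
--     if not group_answer_array: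
--         return []
--     counts = {}
--     for person in group_answer_array:
--         for c in set(person):
--             counts[c] = counts.get(c, 0) + 1
--     n = len(group_answer_array)
--     return [c for c in group_answer_array[-1] if counts.get(c, 0) == n]
-- ===== Notes on version B (the rewrite author's own statement) =====
-- stated objective: alternative
-- what changed: B never intersects anything: it builds one occurrence-count index (in how many people's distinct-answer sets each character appears) in a single sweep, then keeps a character of the last person iff its count equals the number of people, instead of A's per-person filter passes with linear list-membership tests over a rebuilt candidate list.
import Mathlib
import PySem

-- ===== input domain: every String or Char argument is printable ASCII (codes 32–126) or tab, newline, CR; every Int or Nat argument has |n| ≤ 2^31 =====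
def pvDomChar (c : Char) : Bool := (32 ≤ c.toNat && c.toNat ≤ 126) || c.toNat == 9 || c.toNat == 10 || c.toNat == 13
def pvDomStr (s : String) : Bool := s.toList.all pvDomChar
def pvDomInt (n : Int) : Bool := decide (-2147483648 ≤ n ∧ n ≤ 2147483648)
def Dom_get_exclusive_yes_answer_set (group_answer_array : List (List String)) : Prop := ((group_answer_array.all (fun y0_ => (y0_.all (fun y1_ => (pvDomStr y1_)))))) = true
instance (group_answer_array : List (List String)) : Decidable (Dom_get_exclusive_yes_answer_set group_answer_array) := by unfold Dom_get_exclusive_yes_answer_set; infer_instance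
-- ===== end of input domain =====

-- B replaces A's per-person filtering of a shrinking candidate list by one counting
-- index (how many people's distinct-answer sets contain each character) plus a single
-- filter over the last person (alternative decomposition, no intersection step).

-- ===== PORT A =====
def get_exclusive_yes_answer_set (group_answer_array : List (List String)) : List String :=
  (group_answer_array.foldl
    (fun (s : List String × List String × Bool) i =>
      let inner := i.foldl
        (fun (p : List String × List String) j =>
          if s.2.2 then (p.1 ++ [j], p.2)
          else if j ∈ p.1 then (p.1, p.2 ++ [j]) else p)
        (s.1, s.2.1)
      if s.2.2 then (inner.1, inner.2, false) else (inner.2, ([] : List String), false))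
    (([] : List String), ([] : List String), true)).1

-- ===== PORT B =====
def get_exclusive_yes_answer_set_alt (group_answer_array : List (List String)) : List String :=
  match group_answer_array with
  | [] => []
  | _ :: _ =>
    let counts : PySem.Dict String Int :=
      group_answer_array.foldl
        (fun d person =>
          (PySem.Set.ofList person).foldl (fun d c => d.insert c (d.getD c 0 + 1)) d)
        PySem.Dict.empty
    let n : Int := group_answer_array.length
    (group_answer_array.getLastD []).filter (fun c => counts.getD c 0 == n)

-- ===== PRECONDITION & SPEC =====
def Spec_get_exclusive_yes_answer_set (group_answer_array : List (List String)) (out : List String) : Prop := out = get_exclusive_yes_answer_set_alt group_answer_array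
instance (group_answer_array : List (List String)) (out : List String) : Decidable (Spec_get_exclusive_yes_answer_set group_answer_array out) := by unfold Spec_get_exclusive_yes_answer_set; infer_instance

-- ===== CLAIM (what is proved, stated in full; the proofs are below) =====
def Claim_equal_get_exclusive_yes_answer_set : Prop := ∀ (group_answer_array : List (List String)), Dom_get_exclusive_yes_answer_set group_answer_array → Spec_get_exclusive_yes_answer_set group_answer_array (get_exclusive_yes_answer_set group_answer_array)

-- ===== LEMMAS AND PROOFS =====

/-- Recursive description of A's outer loop after the first person. -/
def goA : List String → List (List String) → List String
  | ans, [] => ans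
  | ans, p :: ps => goA (p.filter (fun j => decide (j ∈ ans))) ps

lemma innerTrue (i ans nxt : List String) :
    i.foldl (fun (p : List String × List String) j => (p.1 ++ [j], p.2)) (ans, nxt)
      = (ans ++ i, nxt) := by
  induction i generalizing ans with
  | nil => simp
  | cons j t ih => simp [List.foldl_cons, ih]

lemma innerFalse (i ans nxt : List String) :
    i.foldl (fun (p : List String × List String) j =>
        if j ∈ p.1 then (p.1, p.2 ++ [j]) else p) (ans, nxt)
      = (ans, nxt ++ i.filter (fun j => decide (j ∈ ans))) := by
  induction i generalizing nxt with
  | nil => simp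
  | cons j t ih =>
    by_cases h : j ∈ ans <;> simp [List.foldl_cons, h, ih]

lemma foldA (rest : List (List String)) (ans : List String) :
    (rest.foldl
      (fun (s : List String × List String × Bool) i =>
        let inner := i.foldl
          (fun (p : List String × List String) j =>
            if s.2.2 then (p.1 ++ [j], p.2)
            else if j ∈ p.1 then (p.1, p.2 ++ [j]) else p)
          (s.1, s.2.1)
        if s.2.2 then (inner.1, inner.2, false) else (inner.2, ([] : List String), false))
      (ans, ([] : List String), false)).1 = goA ans rest := by
  induction rest generalizing ans with
  | nil => simp [goA]
  | cons p ps ih =>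
    simp only [List.foldl_cons]
    simp only [Bool.false_eq_true, if_false]
    simp only [innerFalse p ans []]
    simp [goA, ih]

/-- A's surviving list is the last person filtered by "answered by everyone so far". -/
lemma goA_char (rest : List (List String)) (ans lastp : List String)
    (h2 : lastp.filter (fun c => decide (c ∈ ans)) = ans) :
    goA ans rest
      = (rest.getLastD lastp).filter
          (fun c => decide (c ∈ ans) && decide (∀ p ∈ rest, c ∈ p)) := by
  induction rest generalizing ans lastp with
  | nil => simpa using h2.symm
  | cons p ps ih =>
    simp only [goA, List.getLastD_cons]
    rw [ih (p.filter (fun j => decide (j ∈ ans))) p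
      (by
        apply List.filter_congr
        intro c hc
        simp [List.mem_filter, hc])]
    apply List.filter_congr
    intro c _
    simp only [List.mem_filter, decide_eq_true_eq, List.mem_cons]
    rw [Bool.eq_iff_iff]
    simp only [Bool.and_eq_true, decide_eq_true_eq]
    constructor
    · rintro ⟨⟨hp, ha⟩, hall⟩
      refine ⟨ha, fun q hq => ?_⟩
      rcases List.mem_cons.mp hq with e | hq'
      · exact e ▸ hp
      · exact hall q hq'
    · rintro ⟨ha, hall⟩
      exact ⟨⟨hall p (List.mem_cons_self ..), ha⟩,
        fun q hq => hall q (List.mem_cons_of_mem _ hq)⟩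

/-- The counting index reads back as: in how many people's distinct sets c occurs. -/
lemma counts_getD (g : List (List String)) (d : PySem.Dict String Int) (c : String) :
    (g.foldl
        (fun d person =>
          (PySem.Set.ofList person).foldl (fun d c => d.insert c (d.getD c 0 + 1)) d)
        d).getD c 0
      = d.getD c 0 + (g.countP (fun p => decide (c ∈ p)) : Int) := by
  induction g generalizing d with
  | nil => simp
  | cons p ps ih =>
    rw [List.foldl_cons, ih, PySem.Dict.getD_foldl_insert_add_one]
    by_cases h : c ∈ p
    · rw [List.count_eq_one_of_mem (PySem.Set.nodup_ofList p) ((PySem.Set.mem_ofList p c).mpr h)]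
      rw [List.countP_cons_of_pos (by simpa using h)]
      push_cast; ring
    · have : List.count c (PySem.Set.ofList p) = 0 := by
        rw [List.count_eq_zero]
        exact fun hm => h ((PySem.Set.mem_ofList p c).mp hm)
      rw [this, List.countP_cons_of_neg (by simpa using h)]
      push_cast; ring

lemma count_eq_len_iff (g : List (List String)) (c : String) :
    ((g.countP (fun p => decide (c ∈ p)) : Int) == (g.length : Int))
      = decide (∀ p ∈ g, c ∈ p) := by
  rw [Bool.eq_iff_iff]
  simp only [beq_iff_eq, Nat.cast_inj, decide_eq_true_eq]
  rw [List.countP_eq_length]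
  simp

-- ===== VERDICT (by name: the statement is the Claim_ definition above) =====
theorem get_exclusive_yes_answer_set_spec : Claim_equal_get_exclusive_yes_answer_set := by
  intro g _
  unfold Spec_get_exclusive_yes_answer_set
  match g with
  | [] => rfl
  | first :: rest =>
    unfold get_exclusive_yes_answer_set get_exclusive_yes_answer_set_alt
    rw [List.foldl_cons]
    simp only [if_true]
    simp only [innerTrue first [] [], List.nil_append]
    rw [foldA]
    rw [goA_char rest first first
      (List.filter_eq_self.mpr (fun c hc => by simp [hc]))]
    simp only [List.getLastD_cons]
    apply List.filter_congr
    intro c _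
    rw [counts_getD]
    simp only [PySem.Dict.getD_empty, zero_add]
    rw [count_eq_len_iff (first :: rest) c]
    rw [Bool.eq_iff_iff]
    simp
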